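-- pv_equiv track=rewrite | github.com/stefanus-ai-tech/PerfectPitchSong | transpose.py | generate_chord_names
-- ===== SOURCE A (Python) =====
-- minor_chords = ['Am', 'Bbm', 'Bm', 'Cm', 'Dbm', 'Dm', 'Ebm', 'Em', 'Fm', 'Gbm', 'Gm', 'Abm']
--
-- major_chords = ['A', 'Bb', 'B', 'C', 'Db', 'D', 'Eb', 'E', 'F', 'Gb', 'G', 'Ab']
--
-- def get_chord_index(chord_name, chord_type):
--     chords = minor_chords if chord_type == 'minor' else major_chords
--     try:
--         return chords.index(chord_name)
--     except ValueError:
--         raise ValueError(f"Chord {chord_name} is not in the list of {chord_type} chords.")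
--
-- def generate_chord_names(start_chord, chord_type):
--     chords = minor_chords if chord_type == 'minor' else major_chords
--     start_index = get_chord_index(start_chord, chord_type)
--
--     # Generate transposed chord names for both up and down transpositions
--     transposed_chords = [
--         chords[(start_index + i) % 12]
--         for i in range(-6, 6)
--     ]
--
--     return transposed_chords
-- ===== SOURCE B (Python) =====
-- minor_chords = ['Am', 'Bbm', 'Bm', 'Cm', 'Dbm', 'Dm', 'Ebm', 'Em', 'Fm', 'Gbm', 'Gm', 'Abm']
--
-- major_chords = ['A', 'Bb', 'B', 'C', 'Db', 'D', 'Eb', 'E', 'F', 'Gb', 'G', 'Ab']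
--
-- def generate_chord_names(start_chord, chord_type):
--     chords = minor_chords if chord_type == 'minor' else major_chords
--     try:
--         start_index = chords.index(start_chord)
--     except ValueError:
--         raise ValueError(f"Chord {start_chord} is not in the list of {chord_type} chords.")
--     offset = (start_index - 6) % 12
--     return chords[offset:] + chords[:offset]
-- ===== Notes on version B (the rewrite author's own statement) =====
-- stated objective: simpler
-- what changed: Replaces the element-wise comprehension with (start_index + i) % 12 for i in range(-6,6) by computing one rotation offset (start_index - 6) % 12 and concatenating two slices chords[offset:] + chords[:offset].
import Mathlib
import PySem

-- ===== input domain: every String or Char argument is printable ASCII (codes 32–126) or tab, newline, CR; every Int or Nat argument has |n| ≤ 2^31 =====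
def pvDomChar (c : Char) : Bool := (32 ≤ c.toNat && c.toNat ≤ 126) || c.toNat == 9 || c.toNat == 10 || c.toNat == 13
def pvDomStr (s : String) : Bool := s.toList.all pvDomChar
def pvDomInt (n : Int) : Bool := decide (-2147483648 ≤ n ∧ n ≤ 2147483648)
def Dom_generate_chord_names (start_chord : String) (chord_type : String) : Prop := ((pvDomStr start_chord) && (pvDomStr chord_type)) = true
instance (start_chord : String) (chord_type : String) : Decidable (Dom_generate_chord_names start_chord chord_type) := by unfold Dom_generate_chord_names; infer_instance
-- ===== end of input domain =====

-- B builds the rotated list as two slices around one offset instead of an element-wise modular comprehension (simpler; same cost).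

-- ===== PORT A =====
def minorChords : List String := ["Am", "Bbm", "Bm", "Cm", "Dbm", "Dm", "Ebm", "Em", "Fm", "Gbm", "Gm", "Abm"]
def majorChords : List String := ["A", "Bb", "B", "C", "Db", "D", "Eb", "E", "F", "Gb", "G", "Ab"]

-- list.index via PySem.List.index?; none = ValueError (excluded by Pre_)
def get_chord_index (chord_name : String) (chord_type : String) : Option Nat :=
  let chords := if chord_type = "minor" then minorChords else majorChords
  PySem.List.index? chords chord_name

def generate_chord_names (start_chord : String) (chord_type : String) : List String :=
  let chords := if chord_type = "minor" then minorChords else majorChords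
  match get_chord_index start_chord chord_type with
  | none => []  -- Python raises ValueError here; excluded by Pre_
  | some start_index =>
      (PySem.List.pyRange (-6) 6 1).map (fun i =>
        PySem.List.pyGetD chords (PySem.Int.mod ((start_index : Int) + i) 12) "")

-- ===== PORT B =====
def generate_chord_names_alt (start_chord : String) (chord_type : String) : List String :=
  let chords := if chord_type = "minor" then minorChords else majorChords
  match PySem.List.index? chords start_chord with
  | none => []  -- Python raises ValueError here; excluded by Pre_
  | some start_index =>
      let offset := PySem.Int.mod ((start_index : Int) - 6) 12
      PySem.List.slice chords (some offset) none ++ PySem.List.slice chords none (some offset)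

-- ===== PRECONDITION & SPEC =====
-- Pre_: exactly the inputs where Python's list.index succeeds (otherwise both A and B raise ValueError)
def Pre_generate_chord_names (start_chord : String) (chord_type : String) : Prop :=
  start_chord ∈ (if chord_type = "minor" then minorChords else majorChords)
instance (start_chord : String) (chord_type : String) : Decidable (Pre_generate_chord_names start_chord chord_type) := by unfold Pre_generate_chord_names; infer_instance
def pvWitness_generate_chord_names : String × String := ("A", "major")

def Spec_generate_chord_names (start_chord : String) (chord_type : String) (out : List String) : Prop := out = generate_chord_names_alt start_chord chord_type
instance (start_chord : String) (chord_type : String) (out : List String) : Decidable (Spec_generate_chord_names start_chord chord_type out) := by unfold Spec_generate_chord_names; infer_instance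

-- ===== CLAIM (what is proved, stated in full; the proofs are below) =====
def Claim_equal_generate_chord_names : Prop := ∀ (start_chord : String) (chord_type : String), Dom_generate_chord_names start_chord chord_type → Pre_generate_chord_names start_chord chord_type → Spec_generate_chord_names start_chord chord_type (generate_chord_names start_chord chord_type)

-- ===== LEMMAS AND PROOFS =====

-- ===== VERDICT (by name: the statement is the Claim_ definition above) =====
theorem generate_chord_names_spec : Claim_equal_generate_chord_names := by
  intro s t _ hpre
  unfold Pre_generate_chord_names at hpre
  unfold Spec_generate_chord_names generate_chord_names generate_chord_names_alt get_chord_index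
  by_cases h : t = "minor" <;>
    simp only [h, if_pos] at hpre ⊢ <;>
    fin_cases hpre <;> decide
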